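-- pv_equiv track=rewrite | github.com/HyprPixl/hyprpixl.github.io | scripts/inject_related_posts.py | build_related_html
-- ===== SOURCE A (Python) =====
-- POSTS = [
--     {"date": "30 Mar 2026", "href": "chronolisten.html", "title": "I Built the Audiobook App That Didn't Exist"},
--     {"date": "21 Aug 2025", "href": "lifehacks.html", "title": "Lifehacks"},
--     {"date": "20 Jun 2025", "href": "software-isnt-dead-your-time-is-now.html", "title": "Software Isn't Dead. Your Time Is Now"},
--     {"date": "15 Jun 2025", "href": "killing-expensive-enterprise-software.html", "title": "Expensive Enterprise Software Is Dying. I Saved $70K/Month by Killing It."},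
--     {"date": "5 May 2025", "href": "pacesetter-launch.html", "title": "Launching the Plains Pacesetter Step Challenge"},
--     {"date": "30 Apr 2025", "href": "deploying-python-apps-databricks.html", "title": "Deploying Python Apps on Databricks: What No One Tells You"},
--     {"date": "30 Nov 2024", "href": "killing-it-in-cs-part-2.html", "title": "Killing It in Computer Science (Part 2)"},
--     {"date": "25 Nov 2024", "href": "ai-mistakes-internship-apps.html", "title": "The Worst Ways to Use AI in Internship / Job Apps"},
--     {"date": "20 Nov 2024", "href": "internships-hard-to-get.html", "title": "Internships Are Hard to Get, These Tips Might Help"},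
--     {"date": "15 Nov 2024", "href": "three-best-strategies-cs-degree.html", "title": "Three Strategies for Killing a CS Degree"},
-- ]
--
-- def pick_related(current_href):
--     idx = next((i for i, p in enumerate(POSTS) if p["href"] == current_href), None)
--     others = [p for p in POSTS if p["href"] != current_href]
--     if len(others) <= 3:
--         return others
--     if idx is None:
--         return others[:3]
--     selected = []
--     # adjacent newer post
--     if idx > 0:
--         selected.append(POSTS[idx - 1])
--     # adjacent older post
--     if idx < len(POSTS) - 1:
--         selected.append(POSTS[idx + 1])
--     # fill to 3 from the top of the list (newest first), skip already picked
--     picked_hrefs = {p["href"] for p in selected}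
--     for p in POSTS:
--         if len(selected) >= 3:
--             break
--         if p["href"] != current_href and p["href"] not in picked_hrefs:
--             selected.append(p)
--             picked_hrefs.add(p["href"])
--     return selected
--
-- def build_related_html(current_href):
--     related = pick_related(current_href)
--     items = "\n".join(
--         f'    <li><time>{p["date"]}</time> <a href="{p["href"]}">{p["title"]}</a></li>'
--         for p in related
--     )
--     return (
--         '<section class="keep-reading">\n'
--         '<h2>&#9658; Keep Reading</h2>\n'
--         '<ul>\n'
--         f'{items}\n'
--         '</ul>\n'
--         '</section>'
--     )
-- ===== SOURCE B (Python) =====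
-- POSTS = [
--     {"date": "30 Mar 2026", "href": "chronolisten.html", "title": "I Built the Audiobook App That Didn't Exist"},
--     {"date": "21 Aug 2025", "href": "lifehacks.html", "title": "Lifehacks"},
--     {"date": "20 Jun 2025", "href": "software-isnt-dead-your-time-is-now.html", "title": "Software Isn't Dead. Your Time Is Now"},
--     {"date": "15 Jun 2025", "href": "killing-expensive-enterprise-software.html", "title": "Expensive Enterprise Software Is Dying. I Saved $70K/Month by Killing It."},
--     {"date": "5 May 2025", "href": "pacesetter-launch.html", "title": "Launching the Plains Pacesetter Step Challenge"},
--     {"date": "30 Apr 2025", "href": "deploying-python-apps-databricks.html", "title": "Deploying Python Apps on Databricks: What No One Tells You"},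
--     {"date": "30 Nov 2024", "href": "killing-it-in-cs-part-2.html", "title": "Killing It in Computer Science (Part 2)"},
--     {"date": "25 Nov 2024", "href": "ai-mistakes-internship-apps.html", "title": "The Worst Ways to Use AI in Internship / Job Apps"},
--     {"date": "20 Nov 2024", "href": "internships-hard-to-get.html", "title": "Internships Are Hard to Get, These Tips Might Help"},
--     {"date": "15 Nov 2024", "href": "three-best-strategies-cs-degree.html", "title": "Three Strategies for Killing a CS Degree"},
-- ]
--
-- HREFS = [p["href"] for p in POSTS]
--
--
-- def build_related_html(current_href):
--     # Closed form: the three related indices follow directly from the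
--     # matched position i -- no filtering, no dedup set, no scan of POSTS.
--     n = len(POSTS)
--     if current_href in HREFS:
--         i = HREFS.index(current_href)
--         if i == 0:
--             ids = [1, 2, 3]
--         elif i == 1:
--             ids = [0, 2, 3]
--         elif i == n - 1:
--             ids = [n - 2, 0, 1]
--         else:
--             ids = [i - 1, i + 1, 0]
--     else:
--         ids = [0, 1, 2]
--     items = "\n".join(
--         '    <li><time>{}</time> <a href="{}">{}</a></li>'.format(
--             POSTS[j]["date"], POSTS[j]["href"], POSTS[j]["title"])
--         for j in ids
--     )
--     return ('<section class="keep-reading">\n'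
--             '<h2>&#9658; Keep Reading</h2>\n'
--             '<ul>\n'
--             + items +
--             '\n</ul>\n</section>')
-- ===== Notes on version B (the rewrite author's own statement) =====
-- stated objective: alternative
-- what changed: B derives the three related posts by closed-form index arithmetic on the matched position i (four cases: i=0, i=1, i=last, interior; unknown href gives [0,1,2]), then renders them by direct indexing into POSTS, eliminating A's others filter, len<=3 short-circuit, neighbour appends, picked-href set and fill loop over POSTS entirely.
import Mathlib
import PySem

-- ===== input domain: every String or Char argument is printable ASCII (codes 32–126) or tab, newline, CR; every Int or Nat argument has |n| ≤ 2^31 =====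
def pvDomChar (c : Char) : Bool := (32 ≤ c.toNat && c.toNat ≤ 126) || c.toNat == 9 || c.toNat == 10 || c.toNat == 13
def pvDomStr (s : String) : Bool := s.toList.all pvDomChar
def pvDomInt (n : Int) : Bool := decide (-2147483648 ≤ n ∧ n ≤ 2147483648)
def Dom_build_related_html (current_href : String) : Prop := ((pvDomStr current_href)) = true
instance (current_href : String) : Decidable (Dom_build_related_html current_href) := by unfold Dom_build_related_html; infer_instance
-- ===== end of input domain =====

-- B replaces A's pick_related (filter + short-circuit + neighbour appends + dedup fill loop)
-- by closed-form index arithmetic on the matched position: alternative decomposition, same cost.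

-- shared module constant: posts as (date, href, title) triples
def pvPOSTS : List (String × String × String) := [
  ("30 Mar 2026", "chronolisten.html", "I Built the Audiobook App That Didn't Exist"),
  ("21 Aug 2025", "lifehacks.html", "Lifehacks"),
  ("20 Jun 2025", "software-isnt-dead-your-time-is-now.html", "Software Isn't Dead. Your Time Is Now"),
  ("15 Jun 2025", "killing-expensive-enterprise-software.html", "Expensive Enterprise Software Is Dying. I Saved $70K/Month by Killing It."),
  ("5 May 2025", "pacesetter-launch.html", "Launching the Plains Pacesetter Step Challenge"),
  ("30 Apr 2025", "deploying-python-apps-databricks.html", "Deploying Python Apps on Databricks: What No One Tells You"),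
  ("30 Nov 2024", "killing-it-in-cs-part-2.html", "Killing It in Computer Science (Part 2)"),
  ("25 Nov 2024", "ai-mistakes-internship-apps.html", "The Worst Ways to Use AI in Internship / Job Apps"),
  ("20 Nov 2024", "internships-hard-to-get.html", "Internships Are Hard to Get, These Tips Might Help"),
  ("15 Nov 2024", "three-best-strategies-cs-degree.html", "Three Strategies for Killing a CS Degree")]

def pvDefaultPost : String × String × String := ("", "", "")

-- ===== PORT A =====
-- pick_related, transliterated: idx via next(enumerate…), others filter, the two
-- guards, neighbour appends, then the fill loop over POSTS with the picked_hrefs set.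
def pv_pick_related (current_href : String) : List (String × String × String) :=
  let idx : Option Int :=
    ((PySem.List.enumerate pvPOSTS).find? (fun ip => ip.2.2.1 == current_href)).map (·.1)
  let others := pvPOSTS.filter (fun p => p.2.1 != current_href)
  if others.length ≤ 3 then others
  else
    match idx with
    | none => PySem.List.slice others none (some 3)   -- others[:3]
    | some i =>
      let selected : List (String × String × String) :=
        (if i > 0 then [PySem.List.pyGetD pvPOSTS (i - 1) pvDefaultPost] else []) ++
        (if i < (pvPOSTS.length : Int) - 1 then [PySem.List.pyGetD pvPOSTS (i + 1) pvDefaultPost] else [])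
      let picked : PySem.Set String := PySem.Set.ofList (selected.map (fun p => p.2.1))
      (pvPOSTS.foldl
        (fun (st : List (String × String × String) × PySem.Set String) p =>
          if 3 ≤ st.1.length then st
          else if p.2.1 != current_href && !(PySem.Set.contains st.2 p.2.1) then
            (st.1 ++ [p], PySem.Set.add st.2 p.2.1)
          else st)
        (selected, picked)).1

def build_related_html (current_href : String) : String :=
  let related := pv_pick_related current_href
  let items := PySem.Str.join "\n" (related.map (fun p =>
    "    <li><time>" ++ p.1 ++ "</time> <a href=\"" ++ p.2.1 ++ "\">" ++ p.2.2 ++ "</a></li>"))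
  "<section class=\"keep-reading\">\n<h2>&#9658; Keep Reading</h2>\n<ul>\n" ++ items ++ "\n</ul>\n</section>"

-- ===== PORT B =====
-- Source B: HREFS = [p["href"] for p in POSTS]
def pvHREFS : List String := pvPOSTS.map (fun p => p.2.1)

-- Source B: closed-form case analysis on the matched index
def pvAltIds (current_href : String) : List Int :=
  let n : Int := (pvPOSTS.length : Int)
  if pvHREFS.contains current_href then
    match PySem.List.index? pvHREFS current_href with
    | none => [0, 1, 2]   -- unreachable: membership was just checked
    | some i =>
      if i = 0 then [1, 2, 3]
      else if i = 1 then [0, 2, 3]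
      else if i = n - 1 then [n - 2, 0, 1]
      else [i - 1, i + 1, 0]
  else [0, 1, 2]

-- then render by direct indexing
def build_related_html_alt (current_href : String) : String :=
  let ids := pvAltIds current_href
  let items := PySem.Str.join "\n" (ids.map (fun j =>
    let p := PySem.List.pyGetD pvPOSTS j pvDefaultPost
    "    <li><time>" ++ p.1 ++ "</time> <a href=\"" ++ p.2.1 ++ "\">" ++ p.2.2 ++ "</a></li>"))
  "<section class=\"keep-reading\">\n<h2>&#9658; Keep Reading</h2>\n<ul>\n" ++ items ++ "\n</ul>\n</section>"

-- ===== PRECONDITION & SPEC =====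
def Spec_build_related_html (current_href : String) (out : String) : Prop := out = build_related_html_alt current_href
instance (current_href : String) (out : String) : Decidable (Spec_build_related_html current_href out) := by unfold Spec_build_related_html; infer_instance

-- ===== CLAIM (what is proved, stated in full; the proofs are below) =====
def Claim_equal_build_related_html : Prop := ∀ (current_href : String), Dom_build_related_html current_href → Spec_build_related_html current_href (build_related_html current_href)

-- ===== LEMMAS AND PROOFS =====
-- both renderings coincide once the picked lists agree
lemma pv_reduce (c : String)
    (h : pv_pick_related c = (pvAltIds c).map (fun j => PySem.List.pyGetD pvPOSTS j pvDefaultPost)) :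
    build_related_html c = build_related_html_alt c := by
  simp only [build_related_html, build_related_html_alt, h, List.map_map]
  rfl

lemma pv_nomatch (c : String)
    (h0 : ("chronolisten.html" == c) = false)
    (h1 : ("lifehacks.html" == c) = false)
    (h2 : ("software-isnt-dead-your-time-is-now.html" == c) = false)
    (h3 : ("killing-expensive-enterprise-software.html" == c) = false)
    (h4 : ("pacesetter-launch.html" == c) = false)
    (h5 : ("killing-it-in-cs-part-2.html" == c) = false)
    (h6 : ("ai-mistakes-internship-apps.html" == c) = false)
    (h7 : ("internships-hard-to-get.html" == c) = false)
    (h8 : ("deploying-python-apps-databricks.html" == c) = false)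
    (h9 : ("three-best-strategies-cs-degree.html" == c) = false) :
    build_related_html c = build_related_html_alt c := by
  have n0 : ¬ (c = "chronolisten.html") := fun h => by subst h; simp at h0
  have n1 : ¬ (c = "lifehacks.html") := fun h => by subst h; simp at h1
  have n2 : ¬ (c = "software-isnt-dead-your-time-is-now.html") := fun h => by subst h; simp at h2
  have n3 : ¬ (c = "killing-expensive-enterprise-software.html") := fun h => by subst h; simp at h3
  have n4 : ¬ (c = "pacesetter-launch.html") := fun h => by subst h; simp at h4
  have n5 : ¬ (c = "killing-it-in-cs-part-2.html") := fun h => by subst h; simp at h5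
  have n6 : ¬ (c = "ai-mistakes-internship-apps.html") := fun h => by subst h; simp at h6
  have n7 : ¬ (c = "internships-hard-to-get.html") := fun h => by subst h; simp at h7
  have n8 : ¬ (c = "deploying-python-apps-databricks.html") := fun h => by subst h; simp at h8
  have n9 : ¬ (c = "three-best-strategies-cs-degree.html") := fun h => by subst h; simp at h9
  apply pv_reduce
  simp [pv_pick_related, pvAltIds, pvPOSTS, pvHREFS,
    PySem.List.enumerate, PySem.List.slice, PySem.List.pyGetD, PySem.List.pyGet?, PySem.List.pyIdx?,
    bne, h0, h1, h2, h3, h4, h5, h6, h7, h8, h9, n0, n1, n2, n3, n4, n5, n6, n7, n8, n9]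

-- ===== VERDICT (by name: the statement is the Claim_ definition above) =====
set_option maxRecDepth 100000 in
set_option maxHeartbeats 1000000 in
theorem build_related_html_spec : Claim_equal_build_related_html := by
  intro c _
  unfold Spec_build_related_html
  by_cases e0 : c = "chronolisten.html"; · subst e0; exact pv_reduce _ (by simp [pv_pick_related, pvAltIds, pvPOSTS, pvHREFS, PySem.List.enumerate, PySem.List.pyGetD, PySem.List.pyGet?, PySem.List.pyIdx?, bne, List.idxOf?_cons])
  by_cases e1 : c = "lifehacks.html"; · subst e1; exact pv_reduce _ (by simp [pv_pick_related, pvAltIds, pvPOSTS, pvHREFS, PySem.List.enumerate, PySem.List.pyGetD, PySem.List.pyGet?, PySem.List.pyIdx?, bne, List.idxOf?_cons])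
  by_cases e2 : c = "software-isnt-dead-your-time-is-now.html"; · subst e2; exact pv_reduce _ (by simp [pv_pick_related, pvAltIds, pvPOSTS, pvHREFS, PySem.List.enumerate, PySem.List.pyGetD, PySem.List.pyGet?, PySem.List.pyIdx?, bne, List.idxOf?_cons])
  by_cases e3 : c = "killing-expensive-enterprise-software.html"; · subst e3; exact pv_reduce _ (by simp [pv_pick_related, pvAltIds, pvPOSTS, pvHREFS, PySem.List.enumerate, PySem.List.pyGetD, PySem.List.pyGet?, PySem.List.pyIdx?, bne, List.idxOf?_cons])
  by_cases e4 : c = "pacesetter-launch.html"; · subst e4; exact pv_reduce _ (by simp [pv_pick_related, pvAltIds, pvPOSTS, pvHREFS, PySem.List.enumerate, PySem.List.pyGetD, PySem.List.pyGet?, PySem.List.pyIdx?, bne, List.idxOf?_cons])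
  by_cases e5 : c = "killing-it-in-cs-part-2.html"; · subst e5; exact pv_reduce _ (by simp [pv_pick_related, pvAltIds, pvPOSTS, pvHREFS, PySem.List.enumerate, PySem.List.pyGetD, PySem.List.pyGet?, PySem.List.pyIdx?, bne, List.idxOf?_cons])
  by_cases e6 : c = "ai-mistakes-internship-apps.html"; · subst e6; exact pv_reduce _ (by simp [pv_pick_related, pvAltIds, pvPOSTS, pvHREFS, PySem.List.enumerate, PySem.List.pyGetD, PySem.List.pyGet?, PySem.List.pyIdx?, bne, List.idxOf?_cons])
  by_cases e7 : c = "internships-hard-to-get.html"; · subst e7; exact pv_reduce _ (by simp [pv_pick_related, pvAltIds, pvPOSTS, pvHREFS, PySem.List.enumerate, PySem.List.pyGetD, PySem.List.pyGet?, PySem.List.pyIdx?, bne, List.idxOf?_cons])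
  by_cases e8 : c = "deploying-python-apps-databricks.html"; · subst e8; exact pv_reduce _ (by simp [pv_pick_related, pvAltIds, pvPOSTS, pvHREFS, PySem.List.enumerate, PySem.List.pyGetD, PySem.List.pyGet?, PySem.List.pyIdx?, bne, List.idxOf?_cons])
  by_cases e9 : c = "three-best-strategies-cs-degree.html"; · subst e9; exact pv_reduce _ (by simp [pv_pick_related, pvAltIds, pvPOSTS, pvHREFS, PySem.List.enumerate, PySem.List.pyGetD, PySem.List.pyGet?, PySem.List.pyIdx?, bne, List.idxOf?_cons])
  exact pv_nomatch c
    (by simp [beq_eq_false_iff_ne]; exact fun h => e0 h.symm)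
    (by simp [beq_eq_false_iff_ne]; exact fun h => e1 h.symm)
    (by simp [beq_eq_false_iff_ne]; exact fun h => e2 h.symm)
    (by simp [beq_eq_false_iff_ne]; exact fun h => e3 h.symm)
    (by simp [beq_eq_false_iff_ne]; exact fun h => e4 h.symm)
    (by simp [beq_eq_false_iff_ne]; exact fun h => e5 h.symm)
    (by simp [beq_eq_false_iff_ne]; exact fun h => e6 h.symm)
    (by simp [beq_eq_false_iff_ne]; exact fun h => e7 h.symm)
    (by simp [beq_eq_false_iff_ne]; exact fun h => e8 h.symm)
    (by simp [beq_eq_false_iff_ne]; exact fun h => e9 h.symm)
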